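-- pv_equiv track=rewrite | github.com/gabriellaec/desoft-analise-exercicios | backup/user_198/ch51_2019_12_09_23_18_03_590912.py | cresc
-- ===== SOURCE A (Python) =====
-- def cresc(num):
--     cresc=[]
--     primeiro=num[0]
--     cresc.append(primeiro)
--     maior = primeiro
--     for i in range (1,len(num)):
--         proximo=num[i]
--         if proximo > maior:
--             cresc.append(proximo)
--             maior = proximo
--
--
--     return cresc
-- ===== SOURCE B (Python) =====
-- def cresc(num):
--     primeiro = num[0]
--     # pass 1: prefix-maximum table pm, pm[i] = max(num[:i+1])
--     pm = []
--     m = primeiro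
--     for x in num:
--         if x > m:
--             m = x
--         pm.append(m)
--     # pass 2: keep num[0], then every position where the running max strictly rose
--     return [primeiro] + [num[i] for i in range(1, len(num)) if pm[i] > pm[i - 1]]
-- ===== Notes on version B (the rewrite author's own statement) =====
-- stated objective: alternative
-- what changed: Replaces A's single accumulator-carrying scan (appending while tracking 'maior') with a two-pass decomposition: first build the prefix-maximum table, then select the positions where that table strictly increases.
import Mathlib
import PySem

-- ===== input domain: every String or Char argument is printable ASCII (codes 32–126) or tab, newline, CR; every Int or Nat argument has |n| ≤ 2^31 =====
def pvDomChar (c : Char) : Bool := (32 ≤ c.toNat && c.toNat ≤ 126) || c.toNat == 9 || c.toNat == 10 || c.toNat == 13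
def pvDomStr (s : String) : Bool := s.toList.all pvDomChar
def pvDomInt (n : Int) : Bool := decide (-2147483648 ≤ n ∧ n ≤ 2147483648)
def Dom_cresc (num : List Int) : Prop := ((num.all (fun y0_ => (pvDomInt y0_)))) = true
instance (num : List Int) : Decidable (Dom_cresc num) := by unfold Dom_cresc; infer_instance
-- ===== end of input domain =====

-- B replaces A's accumulator scan by a two-pass build-the-prefix-max-table-then-filter decomposition; same cost, proved equal on nonempty input (A raises IndexError on []).


-- ===== PORT A =====
-- literal port of A: primeiro = num[0]; loop over range(1, len(num)) carrying (cresc, maior)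
def cresc (num : List Int) : List Int :=
  match PySem.List.pyGet? num 0 with
  | none => []   -- unreachable under Pre_cresc (Python raises IndexError)
  | some primeiro =>
    ((PySem.List.pyRange 1 (num.length : Int) 1).foldl
      (fun (st : List Int × Int) i =>
        let proximo := PySem.List.pyGetD num i 0
        if proximo > st.2 then (st.1 ++ [proximo], proximo) else st)
      ([primeiro], primeiro)).1

-- ===== PORT B =====
-- literal port of B: pass 1 builds the prefix-max table pm; pass 2 filters positions where pm strictly rises
def cresc_alt (num : List Int) : List Int :=
  match PySem.List.pyGet? num 0 with
  | none => []   -- unreachable under Pre_cresc (Python raises IndexError)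
  | some primeiro =>
    let pm := (num.foldl
      (fun (st : List Int × Int) x =>
        let m := if x > st.2 then x else st.2
        (st.1 ++ [m], m))
      ([], primeiro)).1
    [primeiro] ++ (PySem.List.pyRange 1 (num.length : Int) 1).filterMap
      (fun i =>
        if PySem.List.pyGetD pm i 0 > PySem.List.pyGetD pm (i - 1) 0
        then some (PySem.List.pyGetD num i 0) else none)

-- ===== PRECONDITION & SPEC =====
-- Python A raises IndexError on the empty list (num[0]); so does B.
def Pre_cresc (num : List Int) : Prop := num ≠ []
instance (num : List Int) : Decidable (Pre_cresc num) := by unfold Pre_cresc; infer_instance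
def pvWitness_cresc : List Int := ([1, 3, 2, 5])

def Spec_cresc (num : List Int) (out : List Int) : Prop := out = cresc_alt num
instance (num : List Int) (out : List Int) : Decidable (Spec_cresc num out) := by unfold Spec_cresc; infer_instance

-- ===== CLAIM (what is proved, stated in full; the proofs are below) =====
def Claim_equal_cresc : Prop := ∀ (num : List Int), Dom_cresc num → Pre_cresc num → Spec_cresc num (cresc num)

-- ===== LEMMAS AND PROOFS =====

-- common reference value: the strict maxima of t above the running max m
def strictRises (m : Int) : List Int → List Int
  | [] => []
  | x :: xs => if x > m then x :: strictRises x xs else strictRises m xs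

-- the prefix-max table over t starting from m
def pms (m : Int) : List Int → List Int
  | [] => []
  | x :: xs => (if x > m then x else m) :: pms (if x > m then x else m) xs

lemma foldA (t : List Int) : ∀ (acc : List Int) (m : Int),
    (t.foldl (fun (st : List Int × Int) x =>
        if x > st.2 then (st.1 ++ [x], x) else st) (acc, m)).1
      = acc ++ strictRises m t := by
  induction t with
  | nil => intro acc m; simp [strictRises]
  | cons x xs ih =>
    intro acc m
    by_cases h : x > m
    · simp [List.foldl_cons, h, strictRises, ih]
    · simp [List.foldl_cons, h, strictRises, ih]

lemma foldP (t : List Int) : ∀ (acc : List Int) (m : Int),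
    (t.foldl (fun (st : List Int × Int) x =>
        let m' := if x > st.2 then x else st.2
        (st.1 ++ [m'], m')) (acc, m)).1
      = acc ++ pms m t := by
  induction t with
  | nil => intro acc m; simp [pms]
  | cons x xs ih =>
    intro acc m
    simp only [List.foldl_cons, pms]
    rw [ih]
    simp

lemma sel_eq (t : List Int) : ∀ (m : Int),
    (List.range t.length).filterMap
      (fun j => if (pms m t).getD j 0 > (m :: pms m t).getD j 0
                then some (t.getD j 0) else none)
      = strictRises m t := by
  induction t with
  | nil => intro m; simp [strictRises]
  | cons x xs ih =>
    intro m
    simp only [List.length_cons]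
    rw [List.range_succ_eq_map, List.filterMap_cons, List.filterMap_map]
    by_cases h : x > m
    · have hx : (if x > m then x else m) = x := if_pos h
      simp only [pms, hx, List.getD_cons_zero, List.getD_cons_succ, strictRises, if_pos h,
        Function.comp_def]
      exact congrArg (x :: ·) (ih x)
    · have hx : (if x > m then x else m) = m := if_neg h
      have hm : ¬ (m > m) := lt_irrefl m
      simp only [pms, hx, List.getD_cons_zero, List.getD_cons_succ, strictRises, if_neg h,
        if_neg hm, Function.comp_def]
      exact ih m

-- ===== VERDICT (by name: the statement is the Claim_ definition above) =====
theorem cresc_spec : Claim_equal_cresc := by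
  intro num _ hpre
  obtain ⟨h, t⟩ : ∃ h t, num = h :: t := by
    cases num with
    | nil => exact absurd rfl hpre
    | cons a l => exact ⟨a, l, rfl⟩
  obtain ⟨t, rfl⟩ := t
  show cresc (h :: t) = cresc_alt (h :: t)
  -- unfold both ports on the cons input
  have hget : PySem.List.pyGet? (h :: t) 0 = some h := by
    simp [PySem.List.pyGet?, PySem.List.pyIdx?]
  -- A side
  have hA : cresc (h :: t) = h :: strictRises h t := by
    unfold cresc
    rw [hget]
    dsimp only
    rw [PySem.List.foldl_pyRange_pyGetD' (h :: t) 0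
      (fun (st : List Int × Int) x => if x > st.2 then (st.1 ++ [x], x) else st)
      ([h], h) (by omega : (0:Int) ≤ 1)]
    simp [foldA]
  -- B side
  have hpm : ((h :: t).foldl
      (fun (st : List Int × Int) x =>
        let m := if x > st.2 then x else st.2
        (st.1 ++ [m], m)) ([], h)).1 = h :: pms h t := by
    have : (if h > h then h else h) = h := by simp
    simp only [List.foldl_cons, this]
    rw [foldP]
    rfl
  have hB : cresc_alt (h :: t) = h :: strictRises h t := by
    unfold cresc_alt
    rw [hget]
    simp only [hpm, List.length_cons]
    rw [PySem.List.pyRange_one]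
    rw [List.filterMap_map]
    have hlen : (((t.length + 1 : Nat) : Int) - 1).toNat = t.length := by omega
    rw [hlen]
    have hfun : ∀ k : Nat,
        ((fun i => if PySem.List.pyGetD (h :: pms h t) i 0 >
                      PySem.List.pyGetD (h :: pms h t) (i - 1) 0
                   then some (PySem.List.pyGetD (h :: t) i 0) else none) ∘
          (fun k : Nat => (1 : Int) + k)) k
        = (fun j => if (pms h t).getD j 0 > (h :: pms h t).getD j 0
                    then some (t.getD j 0) else none) k := by
      intro k
      have h1 : (1 : Int) + (k : Int) = ((k + 1 : Nat) : Int) := by push_cast; ring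
      have h2 : ((k + 1 : Nat) : Int) - 1 = ((k : Nat) : Int) := by push_cast; ring
      simp only [Function.comp_apply, h1, h2, PySem.List.pyGetD_natCast,
        List.getD_cons_succ]
    rw [List.filterMap_congr (fun k _ => hfun k)]
    rw [sel_eq]
    rfl
  rw [hA, hB]
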